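-- pv_equiv track=rewrite | github.com/AnatoliKosarev/pythonStepikCourse | 1/3_functions/1.py | closest_mod_5
-- ===== SOURCE A (Python) =====
-- def closest_mod_5(x):
--     if x <= 5:
--         return 5
--
--     while True:
--         if x % 5 == 0:
--             return x
--         else:
--             x += 1
-- ===== SOURCE B (Python) =====
-- def closest_mod_5(x):
--     if x <= 5:
--         return 5
--     return ((x + 4) // 5) * 5
-- ===== Notes on version B (the rewrite author's own statement) =====
-- stated objective: simpler
-- what changed: Replaced the increment-until-divisible while-loop with the closed-form ceiling-to-multiple-of-5 formula ((x+4)//5)*5.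
import Mathlib
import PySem

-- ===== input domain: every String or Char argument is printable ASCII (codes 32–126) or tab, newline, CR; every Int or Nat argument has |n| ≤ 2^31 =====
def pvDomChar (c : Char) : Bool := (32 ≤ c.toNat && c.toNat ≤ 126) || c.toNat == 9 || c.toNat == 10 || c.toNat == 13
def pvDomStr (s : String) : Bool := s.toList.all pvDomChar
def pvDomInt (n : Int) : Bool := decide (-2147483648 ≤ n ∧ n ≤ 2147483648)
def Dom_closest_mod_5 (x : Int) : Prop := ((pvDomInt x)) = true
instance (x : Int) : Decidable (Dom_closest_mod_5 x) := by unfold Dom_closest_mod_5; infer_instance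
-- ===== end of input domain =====

-- B replaces A's increment-until-divisible loop with the closed-form ((x+4)//5)*5 (simpler).

-- ===== PORT A =====
-- the while-loop of A: increments x until x % 5 == 0 (Python '% 5' with positive
-- divisor 5 coincides exactly with Lean's Int.emod, written 'x % 5' here)
def closestLoopA (x : Int) : Int :=
  if x % 5 == 0 then x else closestLoopA (x + 1)
termination_by ((-x) % 5).toNat
decreasing_by
  simp only [beq_iff_eq] at *
  omega

def closest_mod_5 (x : Int) : Int :=
  if x ≤ 5 then 5 else closestLoopA x

-- ===== PORT B =====
def closest_mod_5_alt (x : Int) : Int :=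
  if x ≤ 5 then 5 else PySem.Int.floordiv (x + 4) 5 * 5

-- ===== PRECONDITION & SPEC =====
def Spec_closest_mod_5 (x : Int) (out : Int) : Prop := out = closest_mod_5_alt x
instance (x : Int) (out : Int) : Decidable (Spec_closest_mod_5 x out) := by unfold Spec_closest_mod_5; infer_instance

-- ===== CLAIM (what is proved, stated in full; the proofs are below) =====
def Claim_equal_closest_mod_5 : Prop := ∀ (x : Int), Dom_closest_mod_5 x → Spec_closest_mod_5 x (closest_mod_5 x)

-- ===== LEMMAS AND PROOFS =====
theorem closestLoopA_eq (x : Int) : closestLoopA x = (x + 4) / 5 * 5 := by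
  induction x using closestLoopA.induct with
  | case1 x h => rw [closestLoopA, if_pos h]; simp only [beq_iff_eq] at h; omega
  | case2 x h ih =>
      rw [closestLoopA, if_neg h, ih]
      simp only [beq_iff_eq] at h
      omega

-- ===== VERDICT (by name: the statement is the Claim_ definition above) =====
theorem closest_mod_5_spec : Claim_equal_closest_mod_5 := by
  intro x _
  unfold Spec_closest_mod_5 closest_mod_5 closest_mod_5_alt
  split_ifs with h
  · rfl
  · rw [closestLoopA_eq, PySem.Int.floordiv_eq_ediv_of_pos (by norm_num)]
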